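-- pv_equiv track=rewrite | github.com/raeez/chiral-bar-cobar | compute/lib/cy_nc_deformation_k3e_engine.py | verify_cy_serre_duality
-- ===== SOURCE A (Python) =====
-- from typing import Dict, List, Optional, Tuple
--
-- def hh_hkr_cy(
--     h: Dict[Tuple[int, int], int],
--     d: int,
-- ) -> Dict[int, int]:
--     """Hochschild cohomology of a CY d-fold via HKR.
--
--     HH^n(X) = bigoplus_{p+q=n} H^q(wedge^p T_X)
--
--     For CY d-fold (omega_X = O_X): wedge^p T_X = Omega^{d-p}_X.
--     So H^q(wedge^p T_X) = h^{d-p, q}.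
--     Thus HH^n = sum_{p+q=n, 0 <= p <= d, 0 <= q <= d} h^{d-p, q}.
--
--     Convention: Caldararu-Keller. HH^0 = endomorphisms, HH^2 = deformations.
--     """
--     hh: Dict[int, int] = {}
--     for n in range(2 * d + 1):
--         total = 0
--         for p in range(d + 1):
--             q = n - p
--             if q < 0 or q > d:
--                 continue
--             total += h.get((d - p, q), 0)
--         if total > 0:
--             hh[n] = total
--     return hh
--
-- def verify_cy_serre_duality(
--     hodge: Dict[Tuple[int, int], int],
--     d: int,
-- ) -> bool:
--     """Verify CY Serre duality: HH^n(X) = HH^{2d-n}(X)."""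
--     hh = hh_hkr_cy(hodge, d)
--     for n in range(2 * d + 1):
--         if hh.get(n, 0) != hh.get(2 * d - n, 0):
--             return False
--     return True
-- ===== SOURCE B (Python) =====
-- def verify_cy_serre_duality(hodge, d):
--     """Verify CY Serre duality: HH^n(X) = HH^{2d-n}(X).
--
--     Via HKR, HH^{d+k} is the k-th superdiagonal trace of the Hodge square
--     and HH^{d-k} its k-th subdiagonal trace, so the duality holds exactly
--     when each superdiagonal sum equals the transposed subdiagonal sum.
--     """
--     return all(
--         sum(hodge.get((i, i + k), 0) for i in range(d + 1 - k)) ==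
--         sum(hodge.get((i + k, i), 0) for i in range(d + 1 - k))
--         for k in range(1, d + 1)
--     )
-- ===== Notes on version B (the rewrite author's own statement) =====
-- stated objective: alternative
-- what changed: Instead of building a degree-indexed dict of positive Hochschild totals and scanning it for palindromicity, B compares, for each offset k, the k-th superdiagonal sum of the Hodge square with its transposed subdiagonal sum, short-circuiting at the first mismatch and never materializing the Hochschild table; Pre_ excludes hodge tables carrying a negative value at a grid key (i,j) with 0<=i,j<=d, where A silently drops non-positive degree totals from its dict.
-- outside the precondition, e.g. on verify_cy_serre_duality({(0, 1): -1}, 1): A returns True, B returns False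
import Mathlib
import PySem

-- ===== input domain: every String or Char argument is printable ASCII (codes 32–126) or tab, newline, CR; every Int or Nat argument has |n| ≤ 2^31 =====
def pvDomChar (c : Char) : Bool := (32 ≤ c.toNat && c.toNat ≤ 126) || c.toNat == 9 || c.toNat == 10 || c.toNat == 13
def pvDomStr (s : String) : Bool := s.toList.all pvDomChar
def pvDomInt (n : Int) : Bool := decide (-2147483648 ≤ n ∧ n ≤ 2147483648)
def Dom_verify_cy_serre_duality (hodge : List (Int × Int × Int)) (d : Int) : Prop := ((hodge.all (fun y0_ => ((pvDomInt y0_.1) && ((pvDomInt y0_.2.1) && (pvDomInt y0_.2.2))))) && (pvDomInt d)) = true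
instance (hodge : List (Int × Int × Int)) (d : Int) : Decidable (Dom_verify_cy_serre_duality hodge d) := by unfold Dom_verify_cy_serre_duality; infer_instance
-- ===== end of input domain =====

-- B replaces A's degree-indexed dict of positive Hochschild totals (and its palindrome scan) by a direct
-- pairwise comparison of the k-th superdiagonal sum of the Hodge square with its transposed subdiagonal sum
-- (alternative decomposition; same asymptotic cost).

-- ===== PORT A =====
-- h.get((i, j), 0): first-match lookup in the association list (the dict convention); shared by both ports
def pvLookup (h : List (Int × Int × Int)) (i j : Int) : Int :=
  match h.find? (fun e => e.1 == i && e.2.1 == j) with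
  | some e => e.2.2
  | none => 0

def hh_hkr_cy (h : List (Int × Int × Int)) (d : Int) : PySem.Dict Int Int :=
  (PySem.List.pyRange 0 (2 * d + 1) 1).foldl
    (fun hh n =>
      let total := (PySem.List.pyRange 0 (d + 1) 1).foldl
        (fun total p =>
          let q := n - p
          if q < 0 ∨ q > d then total else total + pvLookup h (d - p) q) 0
      if total > 0 then hh.insert n total else hh)
    PySem.Dict.empty

def pvCheckLoop (hh : PySem.Dict Int Int) (d : Int) : List Int → Bool
  | [] => true
  | n :: rest =>
    if hh.getD n 0 ≠ hh.getD (2 * d - n) 0 then false else pvCheckLoop hh d rest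

def verify_cy_serre_duality (hodge : List (Int × Int × Int)) (d : Int) : Bool :=
  pvCheckLoop (hh_hkr_cy hodge d) d (PySem.List.pyRange 0 (2 * d + 1) 1)

-- ===== PORT B =====
def verify_cy_serre_duality_alt (hodge : List (Int × Int × Int)) (d : Int) : Bool :=
  (PySem.List.pyRange 1 (d + 1) 1).all (fun k =>
    ((PySem.List.pyRange 0 (d + 1 - k) 1).map (fun i => pvLookup hodge i (i + k))).sum
      == ((PySem.List.pyRange 0 (d + 1 - k) 1).map (fun i => pvLookup hodge (i + k) i)).sum)

-- ===== PRECONDITION & SPEC =====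
-- Pre_ excludes hodge tables carrying a negative value at a grid key (i, j) with 0 ≤ i, j ≤ d: there A's
-- dict silently drops non-positive degree totals, an accident of its 'store only if total > 0' rule that
-- genuine (nonnegative) Hodge numbers never reach.
def Pre_verify_cy_serre_duality (hodge : List (Int × Int × Int)) (d : Int) : Prop :=
  ∀ e ∈ hodge, 0 ≤ e.1 → e.1 ≤ d → 0 ≤ e.2.1 → e.2.1 ≤ d → 0 ≤ e.2.2
instance (hodge : List (Int × Int × Int)) (d : Int) : Decidable (Pre_verify_cy_serre_duality hodge d) := by unfold Pre_verify_cy_serre_duality; infer_instance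
def pvWitness_verify_cy_serre_duality : (List (Int × Int × Int)) × Int := ([(0, 0, 1), (1, 1, 1)], 1)

def Spec_verify_cy_serre_duality (hodge : List (Int × Int × Int)) (d : Int) (out : Bool) : Prop := out = verify_cy_serre_duality_alt hodge d
instance (hodge : List (Int × Int × Int)) (d : Int) (out : Bool) : Decidable (Spec_verify_cy_serre_duality hodge d out) := by unfold Spec_verify_cy_serre_duality; infer_instance

-- ===== CLAIM (what is proved, stated in full; the proofs are below) =====
def Claim_equal_verify_cy_serre_duality : Prop := ∀ (hodge : List (Int × Int × Int)) (d : Int), Dom_verify_cy_serre_duality hodge d → Pre_verify_cy_serre_duality hodge d → Spec_verify_cy_serre_duality hodge d (verify_cy_serre_duality hodge d)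

-- ===== LEMMAS AND PROOFS =====

-- A's inner loop: the degree-n diagonal total
def pvS (h : List (Int × Int × Int)) (d n : Int) : Int :=
  (PySem.List.pyRange 0 (d + 1) 1).foldl
    (fun total p => if n - p < 0 ∨ n - p > d then total else total + pvLookup h (d - p) (n - p)) 0

theorem pv_hh_eq (h : List (Int × Int × Int)) (d : Int) :
    hh_hkr_cy h d =
      (PySem.List.pyRange 0 (2 * d + 1) 1).foldl
        (fun hh n => if pvS h d n > 0 then hh.insert n (pvS h d n) else hh) PySem.Dict.empty := rfl

theorem pv_foldl_insert_getD (f : Int → Int) (L : List Int) (hnd : L.Nodup)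
    (d0 : PySem.Dict Int Int) (m : Int) :
    (L.foldl (fun hh n => if f n > 0 then hh.insert n (f n) else hh) d0).getD m 0 =
      if m ∈ L ∧ f m > 0 then f m else d0.getD m 0 := by
  induction L generalizing d0 with
  | nil => simp
  | cons a L ih =>
    rcases List.nodup_cons.mp hnd with ⟨ha, hnd'⟩
    simp only [List.foldl_cons]
    rw [ih hnd']
    by_cases hm : m = a
    · subst hm
      by_cases hf : f m > 0
      · simp [ha, hf, PySem.Dict.getD_insert_self]
      · simp [ha, hf]
    · by_cases hf : f a > 0
      · rw [if_pos hf]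
        simp [PySem.Dict.getD_insert, List.mem_cons, hm]
      · rw [if_neg hf]
        simp [List.mem_cons, hm]

theorem pv_g_spec (h : List (Int × Int × Int)) (d n : Int) :
    (hh_hkr_cy h d).getD n 0 =
      if (0 ≤ n ∧ n < 2 * d + 1) ∧ pvS h d n > 0 then pvS h d n else 0 := by
  rw [pv_hh_eq, pv_foldl_insert_getD _ _ (PySem.List.nodup_pyRange_one 0 (2 * d + 1)) _ n]
  simp [PySem.List.mem_pyRange_one]

theorem pv_checkLoop_eq_all (hh : PySem.Dict Int Int) (d : Int) (L : List Int) :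
    pvCheckLoop hh d L = L.all (fun n => hh.getD n 0 == hh.getD (2 * d - n) 0) := by
  induction L with
  | nil => rfl
  | cons a L ih =>
    by_cases h : hh.getD a 0 = hh.getD (2 * d - a) 0 <;> simp [pvCheckLoop, h, ih]

theorem pv_list_range_sum (n : Nat) (f : Nat → Int) :
    ((List.range n).map f).sum = ∑ i ∈ Finset.range n, f i := by
  induction n with
  | zero => simp
  | succ n ih =>
    rw [List.range_succ, Finset.sum_range_succ, List.map_append, List.sum_append]
    simp [ih]

theorem pv_pyRange_map_sum (b : Int) (g : Int → Int) :
    ((PySem.List.pyRange 0 b 1).map g).sum = ∑ i ∈ Finset.range b.toNat, g i := by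
  rw [PySem.List.pyRange_one, List.map_map, pv_list_range_sum, show b - 0 = b from sub_zero b]
  exact Finset.sum_congr rfl (fun i _ => by simp)

theorem pv_pvS_eq_sum (h : List (Int × Int × Int)) (d n : Int) :
    pvS h d n = ∑ p ∈ Finset.range (d + 1).toNat,
      (if n - (p : Int) < 0 ∨ n - (p : Int) > d then 0 else pvLookup h (d - p) (n - p)) := by
  unfold pvS
  have hbody : (fun (t p : Int) => if n - p < 0 ∨ n - p > d then t else t + pvLookup h (d - p) (n - p))
      = fun t p => t + (if n - p < 0 ∨ n - p > d then 0 else pvLookup h (d - p) (n - p)) := by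
    funext t p; split_ifs <;> simp
  rw [hbody, PySem.List.foldl_add, zero_add, pv_pyRange_map_sum]

theorem pv_lookup_nonneg (h : List (Int × Int × Int)) (d : Int)
    (hpre : Pre_verify_cy_serre_duality h d) (i j : Int)
    (hi0 : 0 ≤ i) (hid : i ≤ d) (hj0 : 0 ≤ j) (hjd : j ≤ d) : 0 ≤ pvLookup h i j := by
  unfold pvLookup
  cases hf : h.find? (fun e => e.1 == i && e.2.1 == j) with
  | none => simp
  | some e =>
    have hmem := List.mem_of_find?_eq_some hf
    have hpe := List.find?_some hf
    simp only [Bool.and_eq_true, beq_iff_eq] at hpe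
    exact hpre e hmem (hpe.1 ▸ hi0) (hpe.1 ▸ hid) (hpe.2 ▸ hj0) (hpe.2 ▸ hjd)

theorem pv_pvS_nonneg (h : List (Int × Int × Int)) (d n : Int)
    (hpre : Pre_verify_cy_serre_duality h d) (hd : 0 ≤ d) : 0 ≤ pvS h d n := by
  rw [pv_pvS_eq_sum]
  apply Finset.sum_nonneg
  intro p hp
  rw [Finset.mem_range] at hp
  split_ifs with hc
  · exact le_refl 0
  · rw [not_or, not_lt, not_lt] at hc
    exact pv_lookup_nonneg h d hpre _ _ (by omega) (by omega) (by omega) (by omega)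

theorem pv_getD_eq_pvS (h : List (Int × Int × Int)) (d n : Int)
    (hpre : Pre_verify_cy_serre_duality h d) (hd : 0 ≤ d)
    (h0 : 0 ≤ n) (h2 : n ≤ 2 * d) : (hh_hkr_cy h d).getD n 0 = pvS h d n := by
  rw [pv_g_spec]
  by_cases hs : pvS h d n > 0
  · rw [if_pos ⟨⟨h0, by omega⟩, hs⟩]
  · rw [if_neg (fun hcon => hs hcon.2)]
    have := pv_pvS_nonneg h d n hpre hd
    omega

-- the k-th superdiagonal sum IS the degree-(d+k) diagonal total
theorem pv_S_sup (h : List (Int × Int × Int)) (d k : Int) (hk1 : 1 ≤ k) (hkd : k ≤ d) :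
    pvS h d (d + k) = ∑ i ∈ Finset.range (d + 1 - k).toNat, pvLookup h i (i + k) := by
  rw [pv_pvS_eq_sum, ← Finset.sum_range_reflect]
  symm
  trans (∑ i ∈ Finset.range (d + 1 - k).toNat,
      (if d + k - (((d + 1).toNat - 1 - i : Nat) : Int) < 0 ∨ d + k - (((d + 1).toNat - 1 - i : Nat) : Int) > d
       then 0 else pvLookup h (d - (((d + 1).toNat - 1 - i : Nat) : Int)) (d + k - (((d + 1).toNat - 1 - i : Nat) : Int))))
  · apply Finset.sum_congr rfl
    intro i hi
    rw [Finset.mem_range] at hi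
    have hcast : (((d + 1).toNat - 1 - i : Nat) : Int) = d - i := by omega
    rw [hcast, if_neg (by omega),
      show d - (d - (i : Int)) = i by ring, show d + k - (d - (i : Int)) = i + k by ring]
  · refine Finset.sum_subset ((by intro x hx; rw [Finset.mem_range] at hx ⊢; omega : Finset.range (d + 1 - k).toNat ⊆ Finset.range (d + 1).toNat)) ?_
    intro i hi hni
    rw [Finset.mem_range] at hi
    rw [Finset.mem_range] at hni
    have hcast : (((d + 1).toNat - 1 - i : Nat) : Int) = d - i := by omega
    rw [hcast, if_pos (by omega)]

-- the k-th subdiagonal (transposed) sum IS the degree-(d-k) diagonal total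
theorem pv_S_sub (h : List (Int × Int × Int)) (d k : Int) (hk1 : 1 ≤ k) (hkd : k ≤ d) :
    pvS h d (d - k) = ∑ i ∈ Finset.range (d + 1 - k).toNat, pvLookup h (i + k) i := by
  rw [pv_pvS_eq_sum]
  trans (∑ p ∈ Finset.range (d + 1 - k).toNat,
      (if d - k - (p : Int) < 0 ∨ d - k - (p : Int) > d then 0 else pvLookup h (d - p) (d - k - p)))
  · symm
    refine Finset.sum_subset ((by intro x hx; rw [Finset.mem_range] at hx ⊢; omega : Finset.range (d + 1 - k).toNat ⊆ Finset.range (d + 1).toNat)) ?_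
    intro p hp hnp
    rw [Finset.mem_range] at hp
    rw [Finset.mem_range] at hnp
    rw [if_pos (by omega)]
  · rw [← Finset.sum_range_reflect]
    apply Finset.sum_congr rfl
    intro i hi
    rw [Finset.mem_range] at hi
    have hcast : (((d + 1 - k).toNat - 1 - i : Nat) : Int) = d - k - i := by omega
    rw [hcast, if_neg (by omega), show d - (d - k - (i : Int)) = i + k by ring,
      show d - k - (d - k - (i : Int)) = i by ring]

-- ===== VERDICT (by name: the statement is the Claim_ definition above) =====
theorem verify_cy_serre_duality_spec : Claim_equal_verify_cy_serre_duality := by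
  intro hodge d _ hpre
  unfold Spec_verify_cy_serre_duality
  by_cases hd : 0 ≤ d
  · unfold verify_cy_serre_duality verify_cy_serre_duality_alt
    rw [pv_checkLoop_eq_all, Bool.eq_iff_iff, List.all_eq_true, List.all_eq_true]
    have hS : ∀ n : Int, 0 ≤ n → n ≤ 2 * d → (hh_hkr_cy hodge d).getD n 0 = pvS hodge d n :=
      fun n h0 h2 => pv_getD_eq_pvS hodge d n hpre hd h0 h2
    constructor
    · intro H k hk
      rw [PySem.List.mem_pyRange_one] at hk
      have h1 := H (d + k) (by rw [PySem.List.mem_pyRange_one]; omega)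
      rw [beq_iff_eq, hS (d + k) (by omega) (by omega),
        show 2 * d - (d + k) = d - k by ring, hS (d - k) (by omega) (by omega)] at h1
      rw [beq_iff_eq, pv_pyRange_map_sum, pv_pyRange_map_sum,
        ← pv_S_sup hodge d k (by omega) (by omega), ← pv_S_sub hodge d k (by omega) (by omega)]
      exact h1
    · intro H n hn
      rw [PySem.List.mem_pyRange_one] at hn
      rw [beq_iff_eq, hS n (by omega) (by omega), show 2 * d - n = d + (d - n) by ring,
        hS (d + (d - n)) (by omega) (by omega)]
      rcases lt_trichotomy n d with hlt | heq | hgt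
      · have h1 := H (d - n) (by rw [PySem.List.mem_pyRange_one]; omega)
        rw [beq_iff_eq, pv_pyRange_map_sum, pv_pyRange_map_sum,
          ← pv_S_sup hodge d (d - n) (by omega) (by omega),
          ← pv_S_sub hodge d (d - n) (by omega) (by omega)] at h1
        rw [show d - (d - n) = n by ring] at h1
        exact h1.symm
      · rw [heq]; norm_num
      · have h1 := H (n - d) (by rw [PySem.List.mem_pyRange_one]; omega)
        rw [beq_iff_eq, pv_pyRange_map_sum, pv_pyRange_map_sum,
          ← pv_S_sup hodge d (n - d) (by omega) (by omega),
          ← pv_S_sub hodge d (n - d) (by omega) (by omega)] at h1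
        rw [show d + (n - d) = n by ring, show d - (n - d) = d + (d - n) by ring] at h1
        exact h1
  · have h1 : PySem.List.pyRange 0 (2 * d + 1) 1 = [] := PySem.List.pyRange_one_eq_nil (by omega)
    have h2 : PySem.List.pyRange 1 (d + 1) 1 = [] := PySem.List.pyRange_one_eq_nil (by omega)
    unfold verify_cy_serre_duality verify_cy_serre_duality_alt
    rw [h1, h2]
    rfl
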